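-- pv_equiv track=rewrite | github.com/Maltysnack/Maltysnack.github.io | games/data/scrape.py | classify_weight
-- ===== SOURCE A (Python) =====
-- def classify_weight(slug: str) -> int:
--     s = slug.lower()
--     if "pro-tour" in s and ("top-8" in s or "top-eight" in s):
--         return 10
--     if "pro-tour" in s:
--         return 5
--     premier_keywords = (
--         "champions-cup", "regional-championship", "magic-spotlight",
--         "magic-series", "mtg-china-open", "championship-final",
--         "anz-super-series", "championship-finals",
--     )
--     if any(k in s for k in premier_keywords):
--         return 3
--     return 1
-- ===== SOURCE B (Python) =====
-- PREMIER_KEYWORDS = (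
--     "champions-cup", "regional-championship", "magic-spotlight",
--     "magic-series", "mtg-china-open", "championship-final",
--     "anz-super-series", "championship-finals",
-- )
--
-- def classify_weight(slug: str) -> int:
--     # Single left-to-right scan over start positions: at each position test which
--     # tokens begin there (startswith at offset i), accumulating three flags;
--     # classify once at the end.
--     s = slug.lower()
--     pro = top = premier = False
--     for i in range(len(s) + 1):
--         if s.startswith("pro-tour", i):
--             pro = True
--         if s.startswith("top-8", i) or s.startswith("top-eight", i):
--             top = True
--         if any(s.startswith(k, i) for k in PREMIER_KEYWORDS):
--             premier = True
--     if pro: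
--         return 10 if top else 5
--     return 3 if premier else 1
-- ===== Notes on version B (the rewrite author's own statement) =====
-- stated objective: alternative
-- what changed: Replaces keyword-major substring membership tests with early returns by a position-major single scan: one pass over all start positions testing each token with startswith at that offset, accumulating three flags that are classified once at the end.
import Mathlib
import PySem

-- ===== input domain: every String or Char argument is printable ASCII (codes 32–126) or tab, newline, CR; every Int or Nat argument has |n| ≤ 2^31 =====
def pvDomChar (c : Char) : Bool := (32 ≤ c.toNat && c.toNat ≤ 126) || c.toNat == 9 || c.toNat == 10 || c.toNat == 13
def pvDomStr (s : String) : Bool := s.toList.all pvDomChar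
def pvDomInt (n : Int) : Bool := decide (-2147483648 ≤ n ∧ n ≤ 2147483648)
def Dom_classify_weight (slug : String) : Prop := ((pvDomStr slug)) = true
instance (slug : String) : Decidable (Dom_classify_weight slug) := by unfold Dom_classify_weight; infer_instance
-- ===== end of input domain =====

-- B replaces A's per-keyword substring tests and early returns by a single position-major
-- scan accumulating three flags, classified once at the end (alternative decomposition).

-- ===== PORT A =====
def pvPremierKeywords : List String :=
  ["champions-cup", "regional-championship", "magic-spotlight",
   "magic-series", "mtg-china-open", "championship-final",
   "anz-super-series", "championship-finals"]

def classify_weight (slug : String) : Int :=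
  let s := PySem.Str.lower slug
  if PySem.Str.isIn "pro-tour" s && (PySem.Str.isIn "top-8" s || PySem.Str.isIn "top-eight" s) then 10
  else if PySem.Str.isIn "pro-tour" s then 5
  else if pvPremierKeywords.any (fun k => PySem.Str.isIn k s) then 3
  else 1

-- ===== PORT B =====
-- loop body of Source B: s.startswith(k, i) with 0 ≤ i ≤ len s is exactly 'k is a prefix of s.drop i',
-- i.e. PySem.Chars.startswith (s.drop i) k (hand-ported; exact on that range of i)
def pvScanStep (s : List Char) (st : Bool × Bool × Bool) (i : Nat) : Bool × Bool × Bool :=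
  let tail := s.drop i
  (st.1 || PySem.Chars.startswith tail "pro-tour".toList,
   st.2.1 || (PySem.Chars.startswith tail "top-8".toList || PySem.Chars.startswith tail "top-eight".toList),
   st.2.2 || pvPremierKeywords.any (fun k => PySem.Chars.startswith tail k.toList))

def classify_weight_alt (slug : String) : Int :=
  let s := (PySem.Str.lower slug).toList
  let r := (List.range (s.length + 1)).foldl (pvScanStep s) (false, false, false)
  if r.1 then (if r.2.1 then 10 else 5)
  else if r.2.2 then 3 else 1

-- ===== PRECONDITION & SPEC =====
def Spec_classify_weight (slug : String) (out : Int) : Prop := out = classify_weight_alt slug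
instance (slug : String) (out : Int) : Decidable (Spec_classify_weight slug out) := by unfold Spec_classify_weight; infer_instance

-- ===== CLAIM (what is proved, stated in full; the proofs are below) =====
def Claim_equal_classify_weight : Prop := ∀ (slug : String), Dom_classify_weight slug → Spec_classify_weight slug (classify_weight slug)

-- ===== LEMMAS AND PROOFS =====

-- the fold accumulates each flag as the 'or' over the scanned positions
theorem pvScan_foldl (s : List Char) (l : List Nat) (st : Bool × Bool × Bool) :
    l.foldl (pvScanStep s) st =
      (st.1 || l.any (fun i => PySem.Chars.startswith (s.drop i) "pro-tour".toList),
       st.2.1 || l.any (fun i => PySem.Chars.startswith (s.drop i) "top-8".toList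
                              || PySem.Chars.startswith (s.drop i) "top-eight".toList),
       st.2.2 || l.any (fun i => pvPremierKeywords.any
                              (fun k => PySem.Chars.startswith (s.drop i) k.toList))) := by
  induction l generalizing st with
  | nil => simp
  | cons a l ih => simp [pvScanStep, ih, Bool.or_assoc]

-- a startswith scan over all start positions is exactly substring containment
theorem pvAny_startswith (s sub : List Char) (h : sub ≠ []) :
    (List.range (s.length + 1)).any (fun i => PySem.Chars.startswith (s.drop i) sub)
      = PySem.Chars.isIn sub s := by
  rw [Bool.eq_iff_iff]
  rw [← PySem.Chars.exists_prefix_drop_iff_isIn]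
  simp only [List.any_eq_true, List.mem_range, PySem.Chars.startswith_iff]
  constructor
  · rintro ⟨i, _, hi⟩; exact ⟨i, hi⟩
  · rintro ⟨j, hj⟩
    by_cases hle : j ≤ s.length
    · exact ⟨j, by omega, hj⟩
    · exfalso
      have : s.drop j = [] := List.drop_eq_nil_iff.mpr (by omega)
      rw [this] at hj
      exact h (List.prefix_nil.mp hj)

theorem pvAny_or {α : Type} (l : List α) (p q : α → Bool) :
    l.any (fun x => p x || q x) = (l.any p || l.any q) := by
  rw [Bool.eq_iff_iff]
  simp only [List.any_eq_true, Bool.or_eq_true]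
  constructor
  · rintro ⟨x, hx, hpq | hpq⟩
    · exact Or.inl ⟨x, hx, hpq⟩
    · exact Or.inr ⟨x, hx, hpq⟩
  · rintro (⟨x, hx, hp⟩ | ⟨x, hx, hq⟩)
    · exact ⟨x, hx, Or.inl hp⟩
    · exact ⟨x, hx, Or.inr hq⟩

theorem pvAny_swap {α β : Type} (l : List α) (m : List β) (p : α → β → Bool) :
    l.any (fun x => m.any (fun y => p x y)) = m.any (fun y => l.any (fun x => p x y)) := by
  rw [Bool.eq_iff_iff]
  simp only [List.any_eq_true]
  constructor
  · rintro ⟨x, hx, y, hy, hp⟩; exact ⟨y, hy, x, hx, hp⟩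
  · rintro ⟨y, hy, x, hx, hp⟩; exact ⟨x, hx, y, hy, hp⟩

theorem pvAny_congr {α : Type} (l : List α) (p q : α → Bool)
    (h : ∀ x ∈ l, p x = q x) : l.any p = l.any q := by
  induction l with
  | nil => rfl
  | cons a l ih =>
    simp only [List.any_cons, h a (List.mem_cons_self), ih (fun x hx => h x (List.mem_cons_of_mem a hx))]

theorem pvPremier_nonempty (k : String) (hk : k ∈ pvPremierKeywords) : k.toList ≠ [] := by
  fin_cases hk <;> decide

-- ===== VERDICT (by name: the statement is the Claim_ definition above) =====
theorem classify_weight_spec : Claim_equal_classify_weight := by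
  intro slug _
  unfold Spec_classify_weight classify_weight classify_weight_alt
  simp only [PySem.Str.isIn_eq, PySem.Str.toList_lower, pvScan_foldl, Bool.false_or]
  rw [pvAny_or, pvAny_swap]
  rw [pvAny_startswith _ _ (by decide), pvAny_startswith _ _ (by decide),
      pvAny_startswith _ _ (by decide)]
  have hprem : (pvPremierKeywords.any fun y =>
      (List.range ((PySem.Chars.lower slug.toList).length + 1)).any fun x =>
        PySem.Chars.startswith (List.drop x (PySem.Chars.lower slug.toList)) y.toList)
      = pvPremierKeywords.any
          (fun k => PySem.Chars.isIn k.toList (PySem.Chars.lower slug.toList)) :=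
    pvAny_congr _ _ _ (fun k hk => pvAny_startswith _ _ (pvPremier_nonempty k hk))
  rw [hprem]
  set pro := PySem.Chars.isIn "pro-tour".toList (PySem.Chars.lower slug.toList)
  set t8 := PySem.Chars.isIn "top-8".toList (PySem.Chars.lower slug.toList)
  set te := PySem.Chars.isIn "top-eight".toList (PySem.Chars.lower slug.toList)
  set prem := pvPremierKeywords.any (fun k => PySem.Chars.isIn k.toList (PySem.Chars.lower slug.toList))
  cases pro <;> cases t8 <;> cases te <;> cases prem <;> rfl
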